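-- pv_equiv track=rewrite | github.com/JayAI623/real-agent | kingcounty-imap/imap_scrape.py | find_layer_id
-- ===== SOURCE A (Python) =====
-- def find_layer_id(target, layer_map):
--     """Find nodeId for a target layer name. Exact match first, then partial."""
--     target_lower = target.lower()
--     for name, nid in layer_map.items():
--         if target_lower == name.lower():
--             return nid
--     for name, nid in layer_map.items():
--         if target_lower in name.lower():
--             return nid
--     return None
-- ===== SOURCE B (Python) =====
-- def find_layer_id(target, layer_map):
--     """Single pass: return on exact match immediately; remember the first
--     partial match in (found, partial_nid) and fall back to it after the loop."""
--     target_lower = target.lower()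
--     found = False
--     partial_nid = None
--     for name, nid in layer_map.items():
--         name_lower = name.lower()
--         if name_lower == target_lower:
--             return nid
--         if not found and target_lower in name_lower:
--             found = True
--             partial_nid = nid
--     return partial_nid if found else None
-- ===== Notes on version B (the rewrite author's own statement) =====
-- stated objective: alternative
-- what changed: A's two full passes over layer_map (exact-match scan, then partial-match scan) are fused into one pass that returns immediately on an exact match and remembers only the first partial match behind a found-flag.
import Mathlib
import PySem

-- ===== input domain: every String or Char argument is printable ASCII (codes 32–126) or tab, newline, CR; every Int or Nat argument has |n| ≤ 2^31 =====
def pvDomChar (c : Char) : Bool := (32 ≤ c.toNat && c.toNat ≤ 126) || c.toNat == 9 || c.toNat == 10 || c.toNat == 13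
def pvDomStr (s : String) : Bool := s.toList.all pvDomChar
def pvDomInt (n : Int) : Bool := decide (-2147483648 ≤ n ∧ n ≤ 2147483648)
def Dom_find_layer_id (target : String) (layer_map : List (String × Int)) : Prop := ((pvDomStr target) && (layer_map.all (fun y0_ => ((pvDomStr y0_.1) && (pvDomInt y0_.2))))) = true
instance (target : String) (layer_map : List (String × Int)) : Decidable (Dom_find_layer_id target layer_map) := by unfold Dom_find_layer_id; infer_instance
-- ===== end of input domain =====

-- B fuses A's two passes (exact scan, then partial scan) into a single pass with a
-- found-flag remembering the first partial match; return values agree everywhere.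

-- ===== PORT A =====
-- first loop of A: return nid of the first name with target_lower == name.lower()
def pvExactScan (target_lower : String) : List (String × Int) → Option Int
  | [] => none
  | (name, nid) :: rest =>
    if target_lower == PySem.Str.lower name then some nid
    else pvExactScan target_lower rest

-- second loop of A: return nid of the first name with target_lower in name.lower()
def pvPartialScan (target_lower : String) : List (String × Int) → Option Int
  | [] => none
  | (name, nid) :: rest =>
    if PySem.Str.isIn target_lower (PySem.Str.lower name) then some nid
    else pvPartialScan target_lower rest

def find_layer_id (target : String) (layer_map : List (String × Int)) : Option Int :=
  let target_lower := PySem.Str.lower target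
  match pvExactScan target_lower layer_map with
  | some nid => some nid
  | none =>
    match pvPartialScan target_lower layer_map with
    | some nid => some nid
    | none => none

-- ===== PORT B =====
-- B's single loop; state = (found, partial_nid) (partial_nid meaningful only when found)
def pvFuseLoop (target_lower : String) : List (String × Int) → Bool → Int → Option Int
  | [], found, partial_nid => if found then some partial_nid else none
  | (name, nid) :: rest, found, partial_nid =>
    let name_lower := PySem.Str.lower name
    if name_lower == target_lower then some nid
    else if !found && PySem.Str.isIn target_lower name_lower then
      pvFuseLoop target_lower rest true nid
    else
      pvFuseLoop target_lower rest found partial_nid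

def find_layer_id_alt (target : String) (layer_map : List (String × Int)) : Option Int :=
  pvFuseLoop (PySem.Str.lower target) layer_map false 0

-- ===== PRECONDITION & SPEC =====
def Spec_find_layer_id (target : String) (layer_map : List (String × Int)) (out : Option Int) : Prop := out = find_layer_id_alt target layer_map
instance (target : String) (layer_map : List (String × Int)) (out : Option Int) : Decidable (Spec_find_layer_id target layer_map out) := by unfold Spec_find_layer_id; infer_instance

-- ===== CLAIM (what is proved, stated in full; the proofs are below) =====
def Claim_equal_find_layer_id : Prop := ∀ (target : String) (layer_map : List (String × Int)), Dom_find_layer_id target layer_map → Spec_find_layer_id target layer_map (find_layer_id target layer_map)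

-- ===== LEMMAS AND PROOFS =====

-- invariant of B's loop: exact match wins; otherwise a recorded partial (found) wins;
-- otherwise the first partial of the remaining list
theorem pvFuseLoop_eq (tl : String) (l : List (String × Int)) :
    ∀ (found : Bool) (pn : Int),
      pvFuseLoop tl l found pn =
        match pvExactScan tl l with
        | some v => some v
        | none => if found then some pn else pvPartialScan tl l := by
  induction l with
  | nil => intro found pn; simp [pvFuseLoop, pvExactScan, pvPartialScan]
  | cons hd tail ih =>
    intro found pn
    obtain ⟨name, nid⟩ := hd
    by_cases hx : PySem.Str.lower name == tl
    · have hx' : tl == PySem.Str.lower name := by simp_all [beq_iff_eq]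
      simp [pvFuseLoop, pvExactScan, hx, hx']
    · have hx' : ¬ (tl == PySem.Str.lower name) = true := by
        simp only [beq_iff_eq] at *; exact fun h => hx h.symm
      by_cases hin : PySem.Str.isIn tl (PySem.Str.lower name)
        <;> cases hE : pvExactScan tl tail
        <;> cases found
        <;> simp [pvFuseLoop, pvExactScan, pvPartialScan, PySem.Str.isIn, hx, hx', ih, hE,
                  PySem.Str.isIn] at hin ⊢

-- ===== VERDICT (by name: the statement is the Claim_ definition above) =====
theorem find_layer_id_spec : Claim_equal_find_layer_id := by
  intro target layer_map _
  unfold Spec_find_layer_id find_layer_id find_layer_id_alt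
  rw [pvFuseLoop_eq]
  cases hE : pvExactScan (PySem.Str.lower target) layer_map <;>
    cases hP : pvPartialScan (PySem.Str.lower target) layer_map <;> simp [hE, hP]
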